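-- pv_equiv track=rewrite | github.com/Disi77/Advent-of-Code | AdventOfCode2023/day13/puzzle2.py | find_vertical_line_reflection
-- ===== SOURCE A (Python) =====
-- def find_vertical_line_reflection(pattern_raw_data, ignore=None):
--     '''
--     Try to find vertical line reflection
--              |
--         #.##.|.##.
--         ..#.#|#.#.
--         ##...|...#
--         ##...|...#
--         ..#.#|#.#.
--         ..##.|.##.
--         #.#.#|#.#.
--              |
--     Returns index of column left of the vertical line.
--     Returns -1 if there is no vertical reflection.
--     '''
--     pattern = [x for x in pattern_raw_data.split("\n")]
--     reflections = []
--     for i in range(len(pattern[0]) - 1):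
--         for row in pattern:
--             left, right = row[:i+1], row[i+1:]
--             lenght = min(len(left), len(right))
--             left, right = left[-lenght:], right[:lenght]
--             if left[::-1] != right:
--                 break
--         else:
--             reflections.append(i + 1)
--
--     try:
--         if ignore:
--             del reflections[reflections.index(ignore)]
--     except ValueError:
--         pass
--     if not reflections:
--         return -1
--     return reflections[0]
-- ===== SOURCE B (Python) =====
-- def _mirror_at(row, a):
--     # A reflection axis right after column a-1: the two windows around it mirror each other.
--     if not row:
--         return True
--     if a >= len(row):
--         return False
--     n = min(a, len(row) - a)
--     return row[a - n:a] == row[a:a + n][::-1]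
--
--
-- def find_vertical_line_reflection(pattern_raw_data, ignore=None):
--     '''Row-major: keep a shrinking candidate set of axes valid for every row
--     seen so far, then return the first surviving axis (skipping `ignore`).'''
--     rows = pattern_raw_data.split("\n")
--     width = len(rows[0])
--     candidates = list(range(1, width))
--     for row in rows:
--         candidates = [a for a in candidates if _mirror_at(row, a)]
--         if not candidates:
--             break
--     for a in candidates:
--         if not ignore or a != ignore:
--             return a
--     return -1
-- ===== Notes on version B (the rewrite author's own statement) =====
-- stated objective: alternative
-- what changed: B flips the loop nesting: instead of testing every axis against all rows (slicing each row into left/right, trimming, reversing), it keeps one shrinking candidate-axis set, filters it row by row with a single mirrored-window slice comparison per axis, stops as soon as the set is empty, and picks the first surviving axis while skipping `ignore` inline instead of building a full reflection list and deleting from it.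
import Mathlib
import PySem

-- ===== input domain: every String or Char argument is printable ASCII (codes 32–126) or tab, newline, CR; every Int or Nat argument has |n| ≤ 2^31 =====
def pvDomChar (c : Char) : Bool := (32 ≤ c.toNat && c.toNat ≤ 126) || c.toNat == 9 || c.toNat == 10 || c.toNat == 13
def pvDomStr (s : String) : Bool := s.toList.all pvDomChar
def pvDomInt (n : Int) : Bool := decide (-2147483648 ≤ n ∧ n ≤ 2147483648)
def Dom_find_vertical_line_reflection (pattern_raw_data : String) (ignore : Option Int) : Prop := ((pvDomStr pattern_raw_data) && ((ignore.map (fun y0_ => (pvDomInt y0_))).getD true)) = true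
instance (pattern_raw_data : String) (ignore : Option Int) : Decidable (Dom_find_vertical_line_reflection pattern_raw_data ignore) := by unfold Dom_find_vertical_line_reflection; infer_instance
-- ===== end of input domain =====

-- B flips the loop nesting: a shrinking candidate-axis set is filtered row by row by one
-- mirrored-window comparison per axis (stopping once the set is empty), and the first survivor
-- ≠ ignore is returned, instead of A's per-axis scan over all rows followed by list deletion;
-- a different traversal of the same cost class.

-- ===== PORT A =====
def pvRows (s : String) : List (List Char) := PySem.Chars.splitOn s.toList ['\n']

-- one row's check: left, right = row[:i+1], row[i+1:]; trim to common length; left[::-1] == right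
-- (left[::-1] is List.reverse, PySem.List.slice?_none_none_neg_one)
def pvRowCheckA (row : List Char) (i : Int) : Bool :=
  let left := PySem.List.slice row none (some (i + 1))
  let right := PySem.List.slice row (some (i + 1)) none
  let n : Nat := min left.length right.length
  let left2 := PySem.List.slice left (some (-(n : Int))) none
  let right2 := PySem.List.slice right none (some (n : Int))
  left2.reverse == right2

-- the inner `for row in pattern: … break / else:` loop
def pvCheckRowsA : List (List Char) → Int → Bool
  | [], _ => true
  | r :: rs, i => if pvRowCheckA r i then pvCheckRowsA rs i else false

def find_vertical_line_reflection (pattern_raw_data : String) (ignore : Option Int) : Int :=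
  let pattern := pvRows pattern_raw_data
  let w : Int := ((PySem.List.pyGetD pattern 0 []).length : Int)
  let reflections := (PySem.List.pyRange 0 (w - 1) 1).foldl
      (fun acc i => if pvCheckRowsA pattern i then acc ++ [i + 1] else acc) []
  -- try: if ignore: del reflections[reflections.index(ignore)]  except ValueError: pass
  let reflections2 := match ignore with
    | none => reflections
    | some g => if g ≠ 0 then (PySem.List.remove? reflections g).getD reflections else reflections
  match reflections2 with
  | [] => -1
  | x :: _ => x

-- ===== PORT B =====
-- row[a-n:a] == row[a:a+n][::-1]  ([::-1] is List.reverse, PySem.List.slice?_none_none_neg_one)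
def pvMirrorAtB (row : List Char) (a : Int) : Bool :=
  if row = [] then true
  else if (row.length : Int) ≤ a then false
  else
    let an := a.toNat
    let n := min an (row.length - an)
    PySem.List.slice row (some ((an - n : Nat) : Int)) (some ((an : Nat) : Int))
      == (PySem.List.slice row (some ((an : Nat) : Int)) (some ((an + n : Nat) : Int))).reverse

-- candidates = [a for a in candidates if _mirror_at(row, a)], break when empty
def pvFilterRowsB : List (List Char) → List Int → List Int
  | [], cands => cands
  | r :: rs, cands =>
    let c' := cands.filter (fun a => pvMirrorAtB r a)
    if c' = [] then c' else pvFilterRowsB rs c'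

-- for a in candidates: if not ignore or a != ignore: return a;  return -1
def pvPickB : List Int → Option Int → Int
  | [], _ => -1
  | a :: rest, ig =>
    if (match ig with | none => true | some g => g == 0 || a != g) then a else pvPickB rest ig

def find_vertical_line_reflection_alt (pattern_raw_data : String) (ignore : Option Int) : Int :=
  let rows := pvRows pattern_raw_data
  let w : Int := ((PySem.List.pyGetD rows 0 []).length : Int)
  let candidates := PySem.List.pyRange 1 w 1
  pvPickB (pvFilterRowsB rows candidates) ignore

-- ===== PRECONDITION & SPEC =====
def Spec_find_vertical_line_reflection (pattern_raw_data : String) (ignore : Option Int) (out : Int) : Prop := out = find_vertical_line_reflection_alt pattern_raw_data ignore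
instance (pattern_raw_data : String) (ignore : Option Int) (out : Int) : Decidable (Spec_find_vertical_line_reflection pattern_raw_data ignore out) := by unfold Spec_find_vertical_line_reflection; infer_instance

-- ===== CLAIM (what is proved, stated in full; the proofs are below) =====
def Claim_equal_find_vertical_line_reflection : Prop := ∀ (pattern_raw_data : String) (ignore : Option Int), Dom_find_vertical_line_reflection pattern_raw_data ignore → Spec_find_vertical_line_reflection pattern_raw_data ignore (find_vertical_line_reflection pattern_raw_data ignore)

-- ===== LEMMAS AND PROOFS =====

-- core: A's slice/reverse row check at axis i = a-1 agrees with B's paired-index check at axis a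
theorem pvRowCheck_agree (row : List Char) (a : Nat) (ha : 0 < a) :
    pvRowCheckA row ((a : Int) - 1) = pvMirrorAtB row (a : Int) := by
  have h1 : (a : Int) - 1 + 1 = (a : Int) := by ring
  simp only [pvRowCheckA, pvMirrorAtB, h1]
  rw [PySem.List.slice_to_natCast, PySem.List.slice_from_natCast]
  by_cases hrow : row = []
  · subst hrow
    simp [PySem.List.slice]
  · have hL : 0 < row.length := List.length_pos_iff.mpr hrow
    by_cases hla : row.length ≤ a
    · -- right part empty: A compares whole left reversed with []
      have hdrop : row.drop a = [] := by simp [List.drop_eq_nil_iff]; omega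
      have htake : row.take a = row := List.take_of_length_le hla
      simp only [hdrop, htake, List.length_nil, min_zero, Nat.cast_zero, neg_zero]
      rw [show ((0:Int) = ((0:Nat):Int)) from rfl, PySem.List.slice_from_natCast,
        PySem.List.slice_to_natCast]
      simp only [List.drop_zero, List.take_nil]
      have : (row.reverse == ([] : List Char)) = false := by
        simp [hrow]
      rw [this]
      simp only [if_neg hrow]
      rw [if_pos (by exact_mod_cast hla)]
    · rw [Nat.not_le] at hla
      have htl : (row.take a).length = a := by simp; omega
      have hdl : (row.drop a).length = row.length - a := by simp
      rw [htl, hdl]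
      set n := min a (row.length - a) with hn
      have hn1 : 1 ≤ n := by omega
      have hna : n ≤ a := by omega
      have hnd : n ≤ row.length - a := by omega
      rw [PySem.List.slice_from_neg_natCast _ _ hn1, PySem.List.slice_to_natCast, htl]
      simp only [if_neg hrow, if_neg (by push_cast; omega : ¬ ((row.length : Int) ≤ (a:Int))),
        Int.toNat_natCast]
      rw [PySem.List.slice_natCast, PySem.List.slice_natCast]
      rw [show a - (a - n) = n from by omega, show a + n - a = n from by omega]
      rw [show (row.take a).drop (a - n) = (row.drop (a - n)).take n from by
        rw [List.drop_take]; congr 1; omega]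
      rw [Bool.eq_iff_iff]
      simp only [beq_iff_eq]
      constructor
      · intro h; rw [← h, List.reverse_reverse]
      · intro h; rw [h, List.reverse_reverse]

theorem pvCheckRows_agree (rows : List (List Char)) (a : Nat) (ha : 0 < a) :
    pvCheckRowsA rows ((a : Int) - 1) = rows.all (fun r => pvMirrorAtB r (a : Int)) := by
  induction rows with
  | nil => rfl
  | cons r rs ih =>
    simp only [pvCheckRowsA, List.all_cons, pvRowCheck_agree r a ha, ih]
    cases pvMirrorAtB r (a : Int) <;> simp

-- B's row-by-row filtering computes the filter by the conjunction of all rows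
theorem pvFilterRowsB_eq (rows : List (List Char)) (c : List Int) :
    pvFilterRowsB rows c = c.filter (fun a => rows.all (fun r => pvMirrorAtB r a)) := by
  induction rows generalizing c with
  | nil => simp [pvFilterRowsB]
  | cons r rs ih =>
    simp only [pvFilterRowsB, List.all_cons]
    by_cases h : c.filter (fun a => pvMirrorAtB r a) = []
    · simp only [h]
      have : c.filter (fun a => pvMirrorAtB r a && rs.all (fun r' => pvMirrorAtB r' a)) = [] := by
        rw [List.filter_eq_nil_iff] at h ⊢
        intro x hx hb
        exact h x hx (by simpa using (Bool.and_eq_true_iff.mp hb).1)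
      simpa using this.symm
    · rw [if_neg h, ih, List.filter_filter]
      exact List.filter_congr (fun x _ => by rw [Bool.and_comm])

-- selection: pvPickB on a nodup list = head-or-(-1) after A's optional first-occurrence removal
theorem pvPick_agree (L : List Int) (hnd : L.Nodup) (ig : Option Int) :
    pvPickB L ig = (match (match ig with
        | none => L
        | some g => if g ≠ 0 then (PySem.List.remove? L g).getD L else L) with
      | [] => -1
      | x :: _ => x) := by
  cases ig with
  | none => cases L with
    | nil => rfl
    | cons a rest => simp [pvPickB]
  | some g =>
    by_cases hg : g = 0
    · subst hg
      cases L with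
      | nil => rfl
      | cons a rest => simp [pvPickB]
    · simp only [if_pos hg, ne_eq]
      induction L with
      | nil => simp [pvPickB, PySem.List.remove?]
      | cons a rest ih =>
        by_cases hag : a = g
        · subst hag
          rw [PySem.List.remove?_cons_self]
          have hnotmem : a ∉ rest := (List.nodup_cons.mp hnd).1
          simp only [pvPickB, bne_self_eq_false, Bool.or_false,
            beq_iff_eq, hg, if_false, Option.getD_some]
          cases rest with
          | nil => rfl
          | cons b rs =>
            have hb : b ≠ a := by
              intro h; exact hnotmem (h ▸ List.mem_cons_self)
            simp [pvPickB, hb]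
        · rw [PySem.List.remove?_cons_of_ne _ hag]
          have : (if (g == 0 || a != g) = true then a else pvPickB rest (some g)) = a := by
            simp [hag]
          simp only [pvPickB, this]
          cases PySem.List.remove? rest g <;> simp

theorem refl_list_eq (rows : List (List Char)) (len : Nat) :
    ((PySem.List.pyRange 0 ((len : Int) - 1) 1).filter (fun i => pvCheckRowsA rows i)).map (fun i => i + 1)
      = (PySem.List.pyRange 1 (len : Int) 1).filter (fun a => rows.all (fun r => pvMirrorAtB r a)) := by
  rw [PySem.List.pyRange_one, PySem.List.pyRange_one]
  have hm : ((len : Int) - 1 - 0).toNat = ((len : Int) - 1).toNat := by norm_num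
  rw [hm, List.filter_map, List.filter_map, List.map_map]
  have hfil : (List.range ((len : Int) - 1).toNat).filter ((fun i => pvCheckRowsA rows i) ∘ (fun k : Nat => (0 : Int) + k))
      = (List.range ((len : Int) - 1).toNat).filter ((fun a => rows.all (fun r => pvMirrorAtB r a)) ∘ (fun k : Nat => (1 : Int) + k)) := by
    apply List.filter_congr
    intro k _
    have h := pvCheckRows_agree rows (k + 1) (Nat.succ_pos k)
    push_cast at h
    simp only [Function.comp_apply, zero_add, add_comm (1 : Int) (k : Int)]
    simpa using h
  rw [hfil]
  apply List.map_congr_left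
  intro k _
  simp [Function.comp]
  ring

-- ===== VERDICT (by name: the statement is the Claim_ definition above) =====
theorem find_vertical_line_reflection_spec : Claim_equal_find_vertical_line_reflection := by
  intro s ig _
  unfold Spec_find_vertical_line_reflection
  simp only [find_vertical_line_reflection, find_vertical_line_reflection_alt]
  rw [PySem.List.foldl_append_if (fun i => pvCheckRowsA (pvRows s) i) (fun i => i + 1)]
  rw [List.nil_append, refl_list_eq (pvRows s) (PySem.List.pyGetD (pvRows s) 0 []).length]
  rw [pvFilterRowsB_eq]
  exact (pvPick_agree _ ((PySem.List.nodup_pyRange_one _ _).filter _) ig).symm
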